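-- pv_equiv track=rewrite | github.com/shynottea/pp2_22B030385 | lab 3/functions1/3.py | solve
-- ===== SOURCE A (Python) =====
-- def solve(numheads, numlegs):
--     chicks = numheads
--     rabbs = 0
--     while chicks != 35:
--         if (chicks*2) + (rabbs*4) == numlegs:
--             return chicks, rabbs
--         chicks = chicks - 1
--         rabbs = rabbs + 1
-- ===== SOURCE B (Python) =====
-- def solve(numheads, numlegs):
--     diff = numlegs - 2 * numheads
--     if diff >= 0 and diff % 2 == 0:
--         return numheads - diff // 2, diff // 2
-- ===== Notes on version B (the rewrite author's own statement) =====
-- stated objective: faster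
-- what changed: Replaced A's decrementing trial loop by the closed-form solution r=(numlegs-2*numheads)//2, c=numheads-r, computed in O(1).
-- intended difference: When numheads >= 35 and the (unique) solution has chickens <= 35, A's loop stops at its hard-coded barrier chicks == 35 and returns None (even on the textbook input (35, 94)), while B returns the actual solution (numheads - r, r), which is the intended answer. — e.g. on solve(35, 94): A returns none, B returns some [23, 12]
import Mathlib
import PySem

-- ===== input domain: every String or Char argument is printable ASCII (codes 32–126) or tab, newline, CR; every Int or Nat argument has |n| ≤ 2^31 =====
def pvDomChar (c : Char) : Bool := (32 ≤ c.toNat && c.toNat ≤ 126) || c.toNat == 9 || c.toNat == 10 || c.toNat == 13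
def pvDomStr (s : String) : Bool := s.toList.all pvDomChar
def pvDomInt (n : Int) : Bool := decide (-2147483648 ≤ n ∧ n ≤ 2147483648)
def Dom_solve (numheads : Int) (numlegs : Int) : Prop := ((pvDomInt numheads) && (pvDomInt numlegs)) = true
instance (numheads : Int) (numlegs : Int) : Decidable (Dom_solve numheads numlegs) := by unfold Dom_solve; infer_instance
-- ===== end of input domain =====

-- B replaces A's decrementing while-loop by the closed-form r=(legs-2*heads)//2, c=heads-r (O(1));
-- where A's hard-coded 'chicks == 35' barrier makes it return None although a solution exists, B returns that solution (see D_solve).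


-- ===== PORT A =====
-- A's while-loop: state (chicks, rabbs); fuel only makes the recursion total — under Pre_solve
-- the loop stops (guard or return) strictly before the fuel runs out.
def solveLoop : Nat → Int → Int → Int → Option (List Int)
  | 0, _, _, _ => none
  | Nat.succ f, chicks, rabbs, numlegs =>
    if chicks = 35 then none
    else if chicks * 2 + rabbs * 4 = numlegs then some [chicks, rabbs]
    else solveLoop f (chicks - 1) (rabbs + 1) numlegs

def solve (numheads : Int) (numlegs : Int) : Option (List Int) :=
  solveLoop ((numheads - 35).natAbs + (numlegs - 2 * numheads).natAbs + 1) numheads 0 numlegs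

-- ===== PORT B =====
def solve_alt (numheads : Int) (numlegs : Int) : Option (List Int) :=
  let diff := numlegs - 2 * numheads
  if 0 ≤ diff ∧ PySem.Int.mod diff 2 = 0 then
    some [numheads - PySem.Int.floordiv diff 2, PySem.Int.floordiv diff 2]
  else none

-- ===== PRECONDITION & SPEC =====
-- Pre_solve excludes exactly the inputs on which A's while-loop never terminates:
-- numheads < 35 (the guard can never fire) together with no solution (numlegs - 2*numheads negative or odd).
def Pre_solve (numheads : Int) (numlegs : Int) : Prop :=
  35 ≤ numheads ∨ (0 ≤ numlegs - 2 * numheads ∧ (numlegs - 2 * numheads) % 2 = 0)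
instance (numheads : Int) (numlegs : Int) : Decidable (Pre_solve numheads numlegs) := by unfold Pre_solve; infer_instance
def pvWitness_solve : Int × Int := (3, 10)

-- When numheads ≥ 35 and the solution has chickens ≤ 35, A returns None because its loop stops at the
-- hard-coded barrier chicks == 35, while B returns the actual solution, which is the intended answer.
def D_solve (numheads : Int) (numlegs : Int) : Prop :=
  35 ≤ numheads ∧ 0 ≤ numlegs - 2 * numheads ∧ (numlegs - 2 * numheads) % 2 = 0 ∧
    2 * (numheads - 35) ≤ numlegs - 2 * numheads
instance (numheads : Int) (numlegs : Int) : Decidable (D_solve numheads numlegs) := by unfold D_solve; infer_instance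

def Spec_solve (numheads : Int) (numlegs : Int) (out : Option (List Int)) : Prop :=
  ¬ D_solve numheads numlegs → out = solve_alt numheads numlegs
instance (numheads : Int) (numlegs : Int) (out : Option (List Int)) : Decidable (Spec_solve numheads numlegs out) := by unfold Spec_solve; infer_instance

def pvDiffWitness_solve : Int × Int := (35, 94)
def pvDiffWitnessOut_solve : (Option (List Int)) × (Option (List Int)) := (none, some [23, 12])

-- ===== CLAIM (what is proved, stated in full; the proofs are below) =====
def Claim_unchanged_solve : Prop := ∀ (numheads : Int) (numlegs : Int), Dom_solve numheads numlegs → Pre_solve numheads numlegs → Spec_solve numheads numlegs (solve numheads numlegs)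
def Claim_changed_solve : Prop := Dom_solve (pvDiffWitness_solve.1) (pvDiffWitness_solve.2) ∧ Pre_solve (pvDiffWitness_solve.1) (pvDiffWitness_solve.2) ∧ D_solve (pvDiffWitness_solve.1) (pvDiffWitness_solve.2) ∧ solve (pvDiffWitness_solve.1) (pvDiffWitness_solve.2) = pvDiffWitnessOut_solve.1 ∧ solve_alt (pvDiffWitness_solve.1) (pvDiffWitness_solve.2) = pvDiffWitnessOut_solve.2 ∧ pvDiffWitnessOut_solve.1 ≠ pvDiffWitnessOut_solve.2
def Claim_exact_solve : Prop := ∀ (numheads : Int) (numlegs : Int), Dom_solve numheads numlegs → Pre_solve numheads numlegs → D_solve numheads numlegs → solve numheads numlegs ≠ solve_alt numheads numlegs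

-- ===== LEMMAS AND PROOFS =====

-- The loop returns some [c - j, r + j] after j steps when the solution is j steps away
-- and the barrier chicks == 35 is not hit on the way.
theorem solveLoop_some (j : Nat) : ∀ (f : Nat) (c r l : Int),
    l - 2 * c - 4 * r = 2 * (j : Int) → (c - 35 < 0 ∨ (j : Int) < c - 35) → j + 1 ≤ f →
    solveLoop f c r l = some [c - (j : Int), r + (j : Int)] := by
  induction j with
  | zero =>
    intro f c r l hsol hbar hf
    match f, hf with
    | Nat.succ f, _ =>
      simp only [solveLoop]
      rw [if_neg (by omega), if_pos (by omega)]
      simp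
  | succ j ih =>
    intro f c r l hsol hbar hf
    match f, hf with
    | Nat.succ f, _ =>
      simp only [solveLoop]
      rw [if_neg (by push_cast at hbar ⊢; omega), if_neg (by push_cast at hsol ⊢; omega)]
      have := ih f (c - 1) (r + 1) l (by push_cast at hsol ⊢; omega)
        (by push_cast at hbar ⊢; omega) (by omega)
      rw [this]
      push_cast
      ring_nf

-- The loop returns none when the barrier is b steps away and no earlier step solves the equation.
theorem solveLoop_none (b : Nat) : ∀ (f : Nat) (c r l : Int),
    c - 35 = (b : Int) → (∀ j : Nat, j < b → l - 2 * c - 4 * r ≠ 2 * (j : Int)) → b + 1 ≤ f →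
    solveLoop f c r l = none := by
  induction b with
  | zero =>
    intro f c r l hbar _ hf
    match f, hf with
    | Nat.succ f, _ =>
      simp only [solveLoop]
      rw [if_pos (by omega)]
  | succ b ih =>
    intro f c r l hbar hnos hf
    match f, hf with
    | Nat.succ f, _ =>
      simp only [solveLoop]
      rw [if_neg (by push_cast at hbar ⊢; omega)]
      rw [if_neg (by
        have := hnos 0 (by omega)
        push_cast at this ⊢
        omega)]
      apply ih f (c - 1) (r + 1) l (by push_cast at hbar ⊢; omega) ?_ (by omega)
      intro j hj
      have := hnos (j + 1) (by omega)
      push_cast at this ⊢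
      omega

theorem floordiv_two (d : Int) : PySem.Int.floordiv d 2 = d / 2 :=
  PySem.Int.floordiv_eq_ediv_of_pos (by omega)

theorem mod_two (d : Int) : PySem.Int.mod d 2 = d % 2 :=
  PySem.Int.mod_eq_emod_of_pos (by omega)

-- A = B on Pre outside D.
theorem solve_eq_alt (numheads numlegs : Int)
    (hpre : Pre_solve numheads numlegs) (hnd : ¬ D_solve numheads numlegs) :
    solve numheads numlegs = solve_alt numheads numlegs := by
  unfold Pre_solve at hpre
  unfold D_solve at hnd
  simp only [solve, solve_alt, floordiv_two, mod_two]
  set d : Int := numlegs - 2 * numheads with hd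
  by_cases hval : 0 ≤ d ∧ d % 2 = 0
  · rw [if_pos hval]
    -- solution j steps away, barrier not reached first (else D would hold)
    set j : Nat := (d / 2).toNat with hj
    have hdj : d = 2 * (j : Int) := by omega
    have hbar : numheads - 35 < 0 ∨ (j : Int) < numheads - 35 := by omega
    rw [solveLoop_some j _ numheads 0 numlegs (by omega) hbar (by omega)]
    have : d / 2 = (j : Int) := by omega
    rw [this]
    norm_num
  · rw [if_neg hval]
    -- no solution at all: A stops at the barrier (reachable since Pre forces 35 ≤ numheads)
    have h35 : 35 ≤ numheads := by
      rcases hpre with h | h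
      · exact h
      · exact absurd h hval
    apply solveLoop_none (numheads - 35).toNat _ numheads 0 numlegs (by omega) ?_ (by omega)
    intro k _
    omega

-- A ≠ B everywhere inside D (on Pre): A hits the barrier and returns none, B returns the solution.
theorem solve_ne_alt (numheads numlegs : Int) (hD : D_solve numheads numlegs) :
    solve numheads numlegs ≠ solve_alt numheads numlegs := by
  unfold D_solve at hD
  simp only [solve, solve_alt, floordiv_two, mod_two]
  obtain ⟨h35, hnn, hev, hle⟩ := hD
  rw [if_pos ⟨hnn, hev⟩]
  rw [solveLoop_none (numheads - 35).toNat _ numheads 0 numlegs (by omega) ?_ (by omega)]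
  · simp
  · intro j hj
    omega

-- ===== VERDICT (by name: the statements are the Claim_ definitions above) =====
theorem solve_spec : Claim_unchanged_solve := by
  intro numheads numlegs _ hpre hnd
  exact solve_eq_alt numheads numlegs hpre hnd

theorem solve_changed : Claim_changed_solve := by
  unfold Claim_changed_solve; decide

theorem solve_tight : Claim_exact_solve := by
  intro numheads numlegs _ _ hD
  exact solve_ne_alt numheads numlegs hD
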